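-- pv_equiv track=rewrite | github.com/isha131618/DAA-lab-evaluation-1-group-08 | 8puzzle3.py | linear_conflict
-- ===== SOURCE A (Python) =====
-- def manhattan(state):
--     d = 0
--     for r in range(3):
--         for c in range(3):
--             v = state[r][c]
--             if v != 0:
--                 tr, tc = divmod(v - 1, 3)
--                 d += abs(r - tr) + abs(c - tc)
--     return d
--
-- def linear_conflict(state):
--     md = manhattan(state)
--     conflicts = 0
--
--     for r in range(3):
--         row = [state[r][c] for c in range(3) if state[r][c] != 0]
--         for i in range(len(row)):
--             for j in range(i + 1, len(row)):
--                 tr_i, _ = divmod(row[i] - 1, 3)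
--                 tr_j, _ = divmod(row[j] - 1, 3)
--                 if tr_i == r and tr_j == r and row[i] > row[j]:
--                     conflicts += 1
--
--     return md + 2 * conflicts
-- ===== SOURCE B (Python) =====
-- def _merge_count(a, b):
--     if not a:
--         return b, 0
--     if not b:
--         return a, 0
--     if a[0] <= b[0]:
--         out, inv = _merge_count(a[1:], b)
--         return [a[0]] + out, inv
--     out, inv = _merge_count(a, b[1:])
--     return [b[0]] + out, inv + len(a)
--
--
-- def _count_inversions(t):
--     if len(t) <= 1:
--         return t, 0
--     m = len(t) // 2
--     left, li = _count_inversions(t[:m])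
--     right, ri = _count_inversions(t[m:])
--     merged, mi = _merge_count(left, right)
--     return merged, li + ri + mi
--
--
-- def linear_conflict(state):
--     total = 0
--     for r in range(3):
--         t = []
--         for c in range(3):
--             v = state[r][c]
--             if v != 0:
--                 tr, tc = divmod(v - 1, 3)
--                 total += abs(r - tr) + abs(c - tc)
--                 if tr == r:
--                     t.append(v)
--         _, inv = _count_inversions(t)
--         total += 2 * inv
--     return total
-- ===== Notes on version B (the rewrite author's own statement) =====
-- stated objective: alternative
-- what changed: Replaces the index-pair double loop over each filtered row by pre-filtering each row to the tiles whose target row is the current row and counting strict inversions of that list with a recursive merge-sort inversion counter, folding the Manhattan terms into the same traversal.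
import Mathlib
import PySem

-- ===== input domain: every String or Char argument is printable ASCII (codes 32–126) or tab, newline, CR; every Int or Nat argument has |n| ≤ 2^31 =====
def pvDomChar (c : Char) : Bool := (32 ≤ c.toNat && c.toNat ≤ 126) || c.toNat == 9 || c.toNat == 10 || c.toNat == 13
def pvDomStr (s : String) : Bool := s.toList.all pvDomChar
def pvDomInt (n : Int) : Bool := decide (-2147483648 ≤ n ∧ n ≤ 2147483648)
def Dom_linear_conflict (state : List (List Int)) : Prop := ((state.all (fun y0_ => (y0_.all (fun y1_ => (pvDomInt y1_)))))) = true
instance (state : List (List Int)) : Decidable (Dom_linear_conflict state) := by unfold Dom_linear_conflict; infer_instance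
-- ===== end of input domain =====

-- B replaces A's nested index-pair conflict loop by target-row pre-filtering plus a recursive
-- merge-sort inversion counter, fused with the Manhattan pass (objective: alternative).

-- ===== PORT A =====
-- state[r][c]; total via default, exact on Pre_ (indices 0..2 in range there)
def pvCell (state : List (List Int)) (r c : Int) : Int :=
  PySem.List.pyGetD (PySem.List.pyGetD state r []) c 0

-- inner 'for c in range(3)' body of manhattan, for one row r with accumulator d
def pvMRowA (state : List (List Int)) (r d : Int) : Int :=
  (PySem.List.pyRange 0 3 1).foldl (fun d c =>
    let v := pvCell state r c
    if v ≠ 0 then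
      let tr := PySem.Int.floordiv (v - 1) 3
      let tc := PySem.Int.mod (v - 1) 3
      d + |r - tr| + |c - tc|
    else d) d

def pvManhattan (state : List (List Int)) : Int :=
  (PySem.List.pyRange 0 3 1).foldl (fun d r => pvMRowA state r d) 0

-- one iteration of A's 'for r in range(3)' conflict loop: filtered row, then the i/j index double loop
def pvCRowA (state : List (List Int)) (r conflicts : Int) : Int :=
  let row := ((PySem.List.pyRange 0 3 1).map (fun c => pvCell state r c)).filter (fun v => v ≠ 0)
  (PySem.List.pyRange 0 (row.length : Int) 1).foldl (fun conflicts i =>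
    (PySem.List.pyRange (i + 1) (row.length : Int) 1).foldl (fun conflicts j =>
      let vi := PySem.List.pyGetD row i 0
      let vj := PySem.List.pyGetD row j 0
      let tri := PySem.Int.floordiv (vi - 1) 3
      let trj := PySem.Int.floordiv (vj - 1) 3
      if tri = r ∧ trj = r ∧ vi > vj then conflicts + 1 else conflicts) conflicts) conflicts

def linear_conflict (state : List (List Int)) : Int :=
  let md := pvManhattan state
  let conflicts := (PySem.List.pyRange 0 3 1).foldl (fun conflicts r => pvCRowA state r conflicts) 0
  md + 2 * conflicts

-- ===== PORT B =====
-- Source B's _merge_count: recursive merge of two lists counting strict inversions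
def pvMergeCount : List Int → List Int → List Int × Int
  | [], b => (b, 0)
  | a, [] => (a, 0)
  | x :: xs, y :: ys =>
    if x ≤ y then
      let p := pvMergeCount xs (y :: ys)
      (x :: p.1, p.2)
    else
      let p := pvMergeCount (x :: xs) ys
      (y :: p.1, p.2 + ((x :: xs).length : Int))

-- Source B's _count_inversions: merge-sort divide and conquer
def pvCountInv (t : List Int) : List Int × Int :=
  if _h : t.length ≤ 1 then (t, 0)
  else
    let m := t.length / 2
    let pl := pvCountInv (t.take m)
    let pr := pvCountInv (t.drop m)
    let pm := pvMergeCount pl.1 pr.1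
    (pm.1, pl.2 + pr.2 + pm.2)
termination_by t.length
decreasing_by
  · simp only [List.length_take]; omega
  · simp only [List.length_drop]; omega

-- one iteration of B's 'for r in range(3)': gather Manhattan terms and the row's
-- target-row-r tiles in column order, then add twice their inversion count
def pvRowB (state : List (List Int)) (r total : Int) : Int :=
  let p := (PySem.List.pyRange 0 3 1).foldl (fun (p : Int × List Int) c =>
    let v := pvCell state r c
    if v ≠ 0 then
      let tr := PySem.Int.floordiv (v - 1) 3
      let tc := PySem.Int.mod (v - 1) 3
      let total := p.1 + |r - tr| + |c - tc|
      if tr = r then (total, p.2 ++ [v]) else (total, p.2)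
    else p) (total, [])
  p.1 + 2 * (pvCountInv p.2).2

def linear_conflict_alt (state : List (List Int)) : Int :=
  (PySem.List.pyRange 0 3 1).foldl (fun total r => pvRowB state r total) 0

-- ===== PRECONDITION & SPEC =====
-- Python A indexes state[r][c] for r,c in 0..2: it raises IndexError unless there are
-- at least 3 rows whose first three each have at least 3 entries.
def Pre_linear_conflict (state : List (List Int)) : Prop :=
  3 ≤ state.length ∧ ∀ row ∈ state.take 3, 3 ≤ row.length
instance (state : List (List Int)) : Decidable (Pre_linear_conflict state) := by
  unfold Pre_linear_conflict; infer_instance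
def pvWitness_linear_conflict : List (List Int) := [[1, 2, 3], [4, 5, 6], [7, 8, 0]]

def Spec_linear_conflict (state : List (List Int)) (out : Int) : Prop := out = linear_conflict_alt state
instance (state : List (List Int)) (out : Int) : Decidable (Spec_linear_conflict state out) := by unfold Spec_linear_conflict; infer_instance

-- ===== CLAIM (what is proved, stated in full; the proofs are below) =====
def Claim_equal_linear_conflict : Prop := ∀ (state : List (List Int)), Dom_linear_conflict state → Pre_linear_conflict state → Spec_linear_conflict state (linear_conflict state)

-- ===== LEMMAS AND PROOFS =====

theorem pvRange3 : PySem.List.pyRange 0 3 1 = [0, 1, 2] := by decide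
theorem pvRange13 : PySem.List.pyRange 1 3 1 = [1, 2] := by decide
theorem pvRange23 : PySem.List.pyRange 2 3 1 = [2] := by decide
theorem pvRange33 : PySem.List.pyRange 3 3 1 = [] := by decide
theorem pvRange12 : PySem.List.pyRange 1 2 1 = [1] := by decide
theorem pvRange22 : PySem.List.pyRange 2 2 1 = [] := by decide
theorem pvRange11 : PySem.List.pyRange 1 1 1 = [] := by decide
theorem pvRange02 : PySem.List.pyRange 0 2 1 = [0, 1] := by decide
theorem pvRange01 : PySem.List.pyRange 0 1 1 = [0] := by decide
theorem pvRange00 : PySem.List.pyRange 0 0 1 = [] := by decide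

theorem pvToNat0 : Int.toNat 0 = 0 := rfl
theorem pvToNat1 : Int.toNat 1 = 1 := rfl
theorem pvToNat2 : Int.toNat 2 = 2 := rfl

theorem pvCountInv_nil : pvCountInv [] = ([], 0) := by
  unfold pvCountInv; rfl

theorem pvCountInv_one (a : Int) : pvCountInv [a] = ([a], 0) := by
  unfold pvCountInv; rfl

theorem pvCountInv_two (a b : Int) :
    (pvCountInv [a, b]).2 = if a ≤ b then 0 else 1 := by
  unfold pvCountInv
  simp [pvCountInv_one, pvMergeCount]
  split_ifs <;> rfl

theorem pvCountInv_three (a b c : Int) :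
    (pvCountInv [a, b, c]).2 =
      ((if a ≤ b then 0 else 1) + (if a ≤ c then 0 else 1)) + (if b ≤ c then 0 else 1) := by
  unfold pvCountInv
  simp only [List.length_cons, List.length_nil]
  norm_num [pvCountInv_one, List.take, List.drop]
  unfold pvCountInv
  norm_num [pvCountInv_one, List.take, List.drop, pvMergeCount]
  by_cases hab : a ≤ b <;> by_cases hac : a ≤ c <;> by_cases hbc : b ≤ c <;>
    simp [pvMergeCount, hab, hac, hbc] <;> (try split_ifs) <;> omega

theorem pvMRowA_shift (state : List (List Int)) (r d : Int) :
    pvMRowA state r d = d + pvMRowA state r 0 := by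
  simp only [pvMRowA, pvRange3, List.foldl]
  split_ifs <;> ring

theorem pvCRowA_shift (state : List (List Int)) (r d : Int) :
    pvCRowA state r d = d + pvCRowA state r 0 := by
  simp only [pvCRowA, pvRange3]
  by_cases h0 : pvCell state r 0 = 0 <;> by_cases h1 : pvCell state r 1 = 0 <;>
    by_cases h2 : pvCell state r 2 = 0 <;>
    norm_num [List.filter, h0, h1, h2, pvRange3, pvRange13, pvRange23, pvRange33, pvRange12,
      pvRange22, pvRange11, pvRange02, pvRange01, pvRange00, List.foldl,
      PySem.List.pyGetD, PySem.List.pyGet?, PySem.List.pyIdx?,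
      pvToNat0, pvToNat1, pvToNat2, List.getElem_cons_succ, List.getElem_cons_zero] <;>
    (try split_ifs) <;> ring

set_option maxHeartbeats 1000000 in
theorem pvRowB_eq (state : List (List Int)) (r t : Int) :
    pvRowB state r t = t + pvMRowA state r 0 + 2 * pvCRowA state r 0 := by
  simp only [pvRowB, pvMRowA, pvCRowA, pvRange3]
  by_cases h0 : pvCell state r 0 = 0 <;> by_cases h1 : pvCell state r 1 = 0 <;>
    by_cases h2 : pvCell state r 2 = 0 <;>
    norm_num [List.filter, h0, h1, h2, pvRange3, pvRange13, pvRange23, pvRange33, pvRange12,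
      pvRange22, pvRange11, pvRange02, pvRange01, pvRange00, List.foldl,
      PySem.List.pyGetD, PySem.List.pyGet?, PySem.List.pyIdx?,
      pvToNat0, pvToNat1, pvToNat2, List.getElem_cons_succ, List.getElem_cons_zero] <;>
    (try split_ifs) <;>
    norm_num [pvCountInv_nil, pvCountInv_one, pvCountInv_two, pvCountInv_three,
      List.singleton_append, List.cons_append, List.nil_append] <;>
    (try split_ifs) <;>
    omega

-- ===== VERDICT (by name: the statement is the Claim_ definition above) =====
theorem linear_conflict_spec : Claim_equal_linear_conflict := by
  intro state _ _
  unfold Spec_linear_conflict linear_conflict linear_conflict_alt pvManhattan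
  simp only [pvRange3, List.foldl]
  rw [pvRowB_eq, pvRowB_eq, pvRowB_eq, pvMRowA_shift state 1, pvMRowA_shift state 2,
    pvCRowA_shift state 1, pvCRowA_shift state 2]
  ring
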